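-- pv_equiv track=rewrite | github.com/plasticsmoke/megaman3-disassembly-ca65 | tools/parse_xkas_regions.py | merge_small_regions
-- ===== SOURCE A (Python) =====
-- def merge_small_regions(regions, min_size=4):
--     """Merge very small code regions surrounded by data into data."""
--     if len(regions) <= 2:
--         return regions
--
--     merged = list(regions)
--     changed = True
--     while changed:
--         changed = False
--         new = []
--         i = 0
--         while i < len(merged):
--             if (i > 0 and i < len(merged) - 1 and
--                 merged[i][2] == 'code' and
--                 merged[i][1] - merged[i][0] + 1 < min_size and
--                 merged[i-1][2] == 'data' and merged[i+1][2] == 'data'):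
--                 # Merge this small code region into surrounding data
--                 # Extend previous data region
--                 new[-1] = (new[-1][0], merged[i+1][1], 'data')
--                 i += 2  # skip next data region too (merged)
--                 changed = True
--             else:
--                 new.append(merged[i])
--                 i += 1
--         merged = new
--
--     return merged
-- ===== SOURCE B (Python) =====
-- def merge_small_regions(regions, min_size=4):
--     """Merge very small code regions surrounded by data into data.
--
--     Single forward pass carrying the last pending region; no fixpoint loop
--     is needed because one pass already reaches the fixpoint."""
--     if len(regions) <= 2:
--         return regions
--     out = []
--     prev = regions[0]
--     k = 1
--     n = len(regions)
--     while k < n: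
--         cur = regions[k]
--         if (k + 1 < n and cur[2] == 'code'
--                 and cur[1] - cur[0] + 1 < min_size
--                 and prev[2] == 'data' and regions[k + 1][2] == 'data'):
--             prev = (prev[0], regions[k + 1][1], 'data')
--             k += 2
--         else:
--             out.append(prev)
--             prev = cur
--             k += 1
--     out.append(prev)
--     return out
-- ===== Notes on version B (the rewrite author's own statement) =====
-- stated objective: simpler
-- what changed: Replaces A's repeat-until-no-change fixpoint loop with mutation of the already-emitted list (new[-1]) by a single forward pass that carries the last pending region and emits a merged data tuple directly, since one pass already reaches the fixpoint.
import Mathlib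
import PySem

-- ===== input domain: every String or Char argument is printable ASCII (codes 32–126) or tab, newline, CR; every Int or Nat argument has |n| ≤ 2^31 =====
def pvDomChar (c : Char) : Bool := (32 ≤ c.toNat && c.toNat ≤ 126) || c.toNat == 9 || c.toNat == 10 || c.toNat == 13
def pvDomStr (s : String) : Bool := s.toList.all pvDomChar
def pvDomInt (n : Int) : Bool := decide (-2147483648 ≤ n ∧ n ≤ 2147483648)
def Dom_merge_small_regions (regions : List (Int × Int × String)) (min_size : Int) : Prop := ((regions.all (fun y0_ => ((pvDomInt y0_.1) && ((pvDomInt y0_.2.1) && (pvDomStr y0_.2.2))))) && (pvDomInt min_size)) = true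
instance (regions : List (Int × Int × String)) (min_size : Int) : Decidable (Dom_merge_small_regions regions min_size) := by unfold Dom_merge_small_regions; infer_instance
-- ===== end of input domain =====

-- B replaces A's fixpoint loop (repeat the merge pass until nothing changes) by a single
-- forward pass carrying the last pending region: simpler, one pass instead of at least two.

-- ===== PORT A =====
-- list indexing merged[i]; every use below is guarded by the same bounds checks Python makes,
-- so the default is never returned where Python would raise
def pvIdxA (l : List (Int × Int × String)) (i : Nat) : Int × Int × String :=
  l.getD i (0, 0, "")

-- inner `while i < len(merged)` loop; state (i, new, changed); `new[-1] = …` becomes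
-- dropLast ++ [updated last] (new is nonempty there in Python: i > 0, so i = 0 has appended)
def pvLoopA (merged : List (Int × Int × String)) (min_size : Int) (i : Nat)
    (newl : List (Int × Int × String)) (changed : Bool) :
    List (Int × Int × String) × Bool :=
  if _h : i < merged.length then
    if 0 < i ∧ i < merged.length - 1 ∧
        (pvIdxA merged i).2.2 = "code" ∧
        (pvIdxA merged i).2.1 - (pvIdxA merged i).1 + 1 < min_size ∧
        (pvIdxA merged (i - 1)).2.2 = "data" ∧ (pvIdxA merged (i + 1)).2.2 = "data" then
      pvLoopA merged min_size (i + 2)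
        (newl.dropLast ++ [((newl.getLastD (0, 0, "")).1, (pvIdxA merged (i + 1)).2.1, "data")])
        true
    else
      pvLoopA merged min_size (i + 1) (newl ++ [pvIdxA merged i]) changed
  else
    (newl, changed)
termination_by merged.length - i
decreasing_by all_goals omega

-- one iteration of the outer `while changed` body
def pvPassA (merged : List (Int × Int × String)) (min_size : Int) :
    List (Int × Int × String) × Bool :=
  pvLoopA merged min_size 0 [] false

-- outer `while changed` loop; the fuel only makes termination evident — it is never
-- exhausted on reachable states (the pass list-stabilises after the first iteration)
def pvOuterA (fuel : Nat) (merged : List (Int × Int × String)) (min_size : Int) :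
    List (Int × Int × String) :=
  match fuel with
  | 0 => merged
  | fuel + 1 =>
    let r := pvPassA merged min_size
    if r.2 then pvOuterA fuel r.1 min_size else r.1

def merge_small_regions (regions : List (Int × Int × String)) (min_size : Int) :
    List (Int × Int × String) :=
  if regions.length ≤ 2 then regions
  else pvOuterA (regions.length + 1) regions min_size

-- ===== PORT B =====
-- Source B's single forward loop over (k, out, prev): the obvious structural recursion on the
-- unprocessed suffix `rest` (= regions[k:]), the emitted `out` becoming the returned list
def pvGoB (min_size : Int) (prev : Int × Int × String) (rest : List (Int × Int × String)) :
    List (Int × Int × String) :=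
  match rest with
  | [] => [prev]
  | [cur] => prev :: pvGoB min_size cur []
  | cur :: nxt :: rest'' =>
    if cur.2.2 = "code" ∧ cur.2.1 - cur.1 + 1 < min_size ∧
        prev.2.2 = "data" ∧ nxt.2.2 = "data" then
      pvGoB min_size (prev.1, nxt.2.1, "data") rest''
    else prev :: pvGoB min_size cur (nxt :: rest'')

def merge_small_regions_alt (regions : List (Int × Int × String)) (min_size : Int) :
    List (Int × Int × String) :=
  if regions.length ≤ 2 then regions
  else
    match regions with
    | [] => regions
    | r :: rs => pvGoB min_size r rs

-- ===== PRECONDITION & SPEC =====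
def Spec_merge_small_regions (regions : List (Int × Int × String)) (min_size : Int) (out : List (Int × Int × String)) : Prop := out = merge_small_regions_alt regions min_size
instance (regions : List (Int × Int × String)) (min_size : Int) (out : List (Int × Int × String)) : Decidable (Spec_merge_small_regions regions min_size out) := by unfold Spec_merge_small_regions; infer_instance

-- ===== CLAIM (what is proved, stated in full; the proofs are below) =====
def Claim_equal_merge_small_regions : Prop := ∀ (regions : List (Int × Int × String)) (min_size : Int), Dom_merge_small_regions regions min_size → Spec_merge_small_regions regions min_size (merge_small_regions regions min_size)

-- ===== LEMMAS AND PROOFS =====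

theorem pvGoB_nil (ms : Int) (p : Int × Int × String) : pvGoB ms p [] = [p] := rfl

theorem pvGoB_one (ms : Int) (p c : Int × Int × String) :
    pvGoB ms p [c] = p :: pvGoB ms c [] := rfl

theorem pvGoB_cons2 (ms : Int) (p a b : Int × Int × String)
    (l : List (Int × Int × String)) :
    pvGoB ms p (a :: b :: l) =
      if a.2.2 = "code" ∧ a.2.1 - a.1 + 1 < ms ∧ p.2.2 = "data" ∧ b.2.2 = "data" then
        pvGoB ms (p.1, b.2.1, "data") l
      else p :: pvGoB ms a (b :: l) := rfl

theorem pvOuterA_succ (fuel : Nat) (merged : List (Int × Int × String)) (ms : Int) :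
    pvOuterA (fuel + 1) merged ms =
      (let r := pvPassA merged ms
       if r.2 then pvOuterA fuel r.1 ms else r.1) := rfl

-- the head of pvGoB's output is prev itself, or an extension of a data prev, still data
theorem pvGoB_head (ms : Int) (prev : Int × Int × String)
    (rest : List (Int × Int × String)) :
    ∃ h t, pvGoB ms prev rest = h :: t ∧
      (h = prev ∨ (prev.2.2 = "data" ∧ h.2.2 = "data")) := by
  fun_induction pvGoB ms prev rest with
  | case1 prev => exact ⟨prev, [], rfl, Or.inl rfl⟩
  | case2 prev cur ih => exact ⟨prev, _, rfl, Or.inl rfl⟩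
  | case3 prev cur nxt rest'' hc ih =>
    obtain ⟨h, t, heq, hd⟩ := ih
    refine ⟨h, t, heq, Or.inr ⟨hc.2.2.1, ?_⟩⟩
    rcases hd with rfl | ⟨_, hh⟩
    · rfl
    · exact hh
  | case4 prev cur nxt rest'' hc ih =>
    exact ⟨prev, _, rfl, Or.inl rfl⟩

-- pvGoB's output is a fixpoint of pvGoB
theorem pvGoB_idem (ms : Int) (prev : Int × Int × String)
    (rest : List (Int × Int × String)) (h : Int × Int × String)
    (t : List (Int × Int × String)) (heq : pvGoB ms prev rest = h :: t) :
    pvGoB ms h t = h :: t := by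
  fun_induction pvGoB ms prev rest generalizing h t with
  | case1 prev =>
    simp only [List.cons.injEq] at heq
    obtain ⟨rfl, rfl⟩ := heq
    rfl
  | case2 prev cur ih =>
    rw [pvGoB_nil] at heq
    simp only [List.cons.injEq] at heq
    obtain ⟨rfl, rfl⟩ := heq
    rw [pvGoB_one, pvGoB_nil]
  | case3 prev cur nxt rest'' hc ih =>
    exact ih h t heq
  | case4 prev cur nxt rest'' hc ih =>
    obtain ⟨h1, t1, heq1, hd1⟩ := pvGoB_head ms cur (nxt :: rest'')
    rw [heq1] at heq
    simp only [List.cons.injEq] at heq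
    obtain ⟨rfl, rfl⟩ := heq
    have hrec := ih h1 t1 heq1
    cases t1 with
    | nil => rw [pvGoB_one, pvGoB_nil]
    | cons d1 t2 =>
      have hfail : ¬ (h1.2.2 = "code" ∧ h1.2.1 - h1.1 + 1 < ms ∧
          prev.2.2 = "data" ∧ d1.2.2 = "data") := by
        rintro ⟨hcode, hsmall, hpd, hnd⟩
        rcases hd1 with rfl | ⟨_, hdat⟩
        · -- h1 = cur : cur is code, small, prev data, so in hc only `nxt data` can fail
          have hnotnxt : ¬ nxt.2.2 = "data" := fun hx => hc ⟨hcode, hsmall, hpd, hx⟩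
          -- cur is code, so pvGoB cur (nxt :: rest'') takes its else branch
          have hel : pvGoB ms h1 (nxt :: rest'') = h1 :: pvGoB ms nxt rest'' := by
            cases rest'' with
            | nil => rw [pvGoB_one]
            | cons e r3 =>
              rw [pvGoB_cons2, if_neg]
              rintro ⟨_, _, hdd, _⟩; rw [hcode] at hdd; exact absurd hdd (by decide)
          rw [hel] at heq1
          simp only [List.cons.injEq] at heq1
          obtain ⟨-, heqt⟩ := heq1
          obtain ⟨h2, t3, heq2, hd2⟩ := pvGoB_head ms nxt rest''
          rw [heq2] at heqt
          cases heqt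
          rcases hd2 with rfl | ⟨hnx, _⟩
          · exact hnotnxt hnd
          · exact hnotnxt hnx
        · rw [hdat] at hcode; exact absurd hcode (by decide)
      rw [pvGoB_cons2, if_neg hfail, hrec]

-- A's inner indexed loop computes B's prev-carrying single pass
theorem pvLoopA_eq (merged : List (Int × Int × String)) (ms : Int) :
    ∀ k i ys p c, merged.length - i ≤ k → 1 ≤ i →
    p.2.2 = (pvIdxA merged (i - 1)).2.2 →
    (pvLoopA merged ms i (ys ++ [p]) c).1 = ys ++ pvGoB ms p (merged.drop i) := by
  intro k
  induction k with
  | zero =>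
    intro i ys p c hk hi _
    have hge : merged.length ≤ i := by omega
    rw [pvLoopA, dif_neg (Nat.not_lt.mpr hge), List.drop_eq_nil_of_le hge, pvGoB_nil]
  | succ k ih =>
    intro i ys p c hk hi hp
    rw [pvLoopA]
    by_cases hlt : i < merged.length
    · rw [dif_pos hlt]
      have hdropi : merged.drop i = merged[i] :: merged.drop (i + 1) :=
        List.drop_eq_getElem_cons hlt
      have hidxi : pvIdxA merged i = merged[i] := by
        simp [pvIdxA, List.getD_eq_getElem?_getD, List.getElem?_eq_getElem hlt]
      by_cases hnxt : i + 1 < merged.length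
      · have hdropi1 : merged.drop (i + 1) = merged[i + 1] :: merged.drop (i + 2) :=
          List.drop_eq_getElem_cons hnxt
        have hidxi1 : pvIdxA merged (i + 1) = merged[i + 1] := by
          simp [pvIdxA, List.getD_eq_getElem?_getD, List.getElem?_eq_getElem hnxt]
        by_cases hc : merged[i].2.2 = "code" ∧ merged[i].2.1 - merged[i].1 + 1 < ms ∧
            p.2.2 = "data" ∧ merged[i + 1].2.2 = "data"
        · -- merge branch on both sides
          have hcA : 0 < i ∧ i < merged.length - 1 ∧
              (pvIdxA merged i).2.2 = "code" ∧
              (pvIdxA merged i).2.1 - (pvIdxA merged i).1 + 1 < ms ∧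
              (pvIdxA merged (i - 1)).2.2 = "data" ∧ (pvIdxA merged (i + 1)).2.2 = "data" := by
            refine ⟨by omega, by omega, ?_, ?_, ?_, ?_⟩ <;>
              simp [hidxi, hidxi1, hc.1, hc.2.1, ← hp, hc.2.2.1, hc.2.2.2]
          rw [if_pos hcA, List.dropLast_concat, List.getLastD_concat]
          have hrec := ih (i + 2) ys (p.1, (pvIdxA merged (i + 1)).2.1, "data") true
            (by omega) (by omega)
            (by simp only [show i + 2 - 1 = i + 1 by omega, hidxi1]; exact hc.2.2.2.symm)
          rw [hrec, hdropi, hdropi1, pvGoB_cons2, if_pos hc, hidxi1]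
        · -- no-merge branch on both sides
          have hcA : ¬ (0 < i ∧ i < merged.length - 1 ∧
              (pvIdxA merged i).2.2 = "code" ∧
              (pvIdxA merged i).2.1 - (pvIdxA merged i).1 + 1 < ms ∧
              (pvIdxA merged (i - 1)).2.2 = "data" ∧ (pvIdxA merged (i + 1)).2.2 = "data") := by
            rintro ⟨-, -, h1, h2, h3, h4⟩
            rw [hidxi] at h1 h2; rw [← hp] at h3; rw [hidxi1] at h4
            exact hc ⟨h1, h2, h3, h4⟩
          rw [if_neg hcA]
          have hrec := ih (i + 1) (ys ++ [p]) (pvIdxA merged i) c (by omega) (by omega)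
            (by simp)
          rw [hdropi, hdropi1, pvGoB_cons2, if_neg hc, ← hdropi1, ← hidxi, hrec]
          simp
      · -- i is the last index: A's `i < len - 1` fails, B's lookahead list is empty
        have hcA : ¬ (0 < i ∧ i < merged.length - 1 ∧
            (pvIdxA merged i).2.2 = "code" ∧
            (pvIdxA merged i).2.1 - (pvIdxA merged i).1 + 1 < ms ∧
            (pvIdxA merged (i - 1)).2.2 = "data" ∧ (pvIdxA merged (i + 1)).2.2 = "data") := by
          rintro ⟨-, hbad, -⟩; omega
        rw [if_neg hcA]
        have hrec := ih (i + 1) (ys ++ [p]) (pvIdxA merged i) c (by omega) (by omega) (by simp)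
        rw [hrec, List.drop_eq_nil_of_le (by omega : merged.length ≤ i + 1), hdropi,
          List.drop_eq_nil_of_le (by omega : merged.length ≤ i + 1), pvGoB_one, pvGoB_nil,
          pvGoB_nil, hidxi]
        simp
    · rw [dif_neg hlt, List.drop_eq_nil_of_le (by omega), pvGoB_nil]

-- one pass of A over a nonempty list computes B's whole pass
theorem pvPassA_eq (m : Int × Int × String) (rest : List (Int × Int × String)) (ms : Int) :
    (pvPassA (m :: rest) ms).1 = pvGoB ms m rest := by
  rw [pvPassA, pvLoopA, dif_pos (by simp : 0 < (m :: rest).length)]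
  rw [if_neg (by rintro ⟨hbad, -⟩; exact absurd hbad (by omega))]
  have h1 : ([] : List (Int × Int × String)) ++ [pvIdxA (m :: rest) 0] = [] ++ [m] := by
    simp [pvIdxA]
  rw [h1]
  have := pvLoopA_eq (m :: rest) ms ((m :: rest).length - 1) 1 [] m false
    (by omega) (by omega) (by simp [pvIdxA])
  simpa using this

-- a fixpoint of the pass is a fixpoint of the whole outer loop, for any fuel
theorem pvOuterA_fix (ms : Int) :
    ∀ fuel (h : Int × Int × String) (t : List (Int × Int × String)),
    pvGoB ms h t = h :: t → pvOuterA fuel (h :: t) ms = h :: t := by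
  intro fuel
  induction fuel with
  | zero => intro h t _; rfl
  | succ fuel ih =>
    intro h t hfix
    rw [pvOuterA_succ]
    have h1 : (pvPassA (h :: t) ms).1 = h :: t := by rw [pvPassA_eq, hfix]
    by_cases hch : (pvPassA (h :: t) ms).2
    · simp only [hch, if_true, h1]; exact ih h t hfix
    · simp only [Bool.not_eq_true] at hch
      simp only [hch, Bool.false_eq_true, if_false, h1]

-- ===== VERDICT (by name: the statement is the Claim_ definition above) =====
theorem merge_small_regions_spec : Claim_equal_merge_small_regions := by
  intro regions min_size _
  unfold Spec_merge_small_regions merge_small_regions merge_small_regions_alt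
  by_cases hlen : regions.length ≤ 2
  · simp [hlen]
  · rw [if_neg hlen, if_neg hlen]
    match regions, hlen with
    | m :: rest, hlen =>
      obtain ⟨h, t, heq, -⟩ := pvGoB_head min_size m rest
      have hfix := pvGoB_idem min_size m rest h t heq
      rw [pvOuterA_succ]
      have h1 : (pvPassA (m :: rest) min_size).1 = h :: t := by rw [pvPassA_eq, heq]
      by_cases hch : (pvPassA (m :: rest) min_size).2
      · simp only [hch, if_true, h1]
        rw [pvOuterA_fix min_size _ h t hfix, heq]
      · simp only [Bool.not_eq_true] at hch
        simp only [hch, Bool.false_eq_true, if_false, h1, heq]
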